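-- pv_equiv track=rewrite | github.com/arunava-de/coding-practice-2 | odd_even_jumps.py | even_jump_idx
-- ===== SOURCE A (Python) =====
-- def even_jump_idx(arr):
--     idx_map = {}
--     n = len(arr)
--     idx_map[n-1] = n-1
--
--     for i in range(n-1):
--         max_val = -float('inf')
--         max_ind = i
--         for j in range(i+1,n):
--             if arr[j]>arr[i]:
--                 continue
--             if arr[j]>max_val:
--                 max_val = arr[j]
--                 max_ind = j
--         if max_ind == i: #No legal jumps present
--             idx_map[i] = None
--         idx_map[i] = max_ind
--
--     return idx_map
-- ===== SOURCE B (Python) =====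
-- def even_jump_idx(arr):
--     # O(n log n): sort indices by (-value, index); a monotonic stack then finds,
--     # for each index i, the earliest index j > i with the largest value <= arr[i].
--     n = len(arr)
--     nxt = list(range(n))          # nxt[i] == i means "no legal jump"
--     order = sorted(range(n), key=lambda i: (-arr[i], i))
--     stack = []
--     for ind in order:
--         while stack and ind > stack[-1]:
--             nxt[stack.pop()] = ind
--         stack.append(ind)
--     res = {n - 1: n - 1}
--     for i in range(n - 1):
--         res[i] = nxt[i]
--     return res
-- ===== Notes on version B (the rewrite author's own statement) =====
-- stated objective: faster
-- what changed: A's O(n^2) nested scan (for each i, rescan the suffix for the largest value <= arr[i]) is replaced by one sort of the indices on the key (-value, index) followed by a monotonic-stack next-greater-index pass.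
import Mathlib
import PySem

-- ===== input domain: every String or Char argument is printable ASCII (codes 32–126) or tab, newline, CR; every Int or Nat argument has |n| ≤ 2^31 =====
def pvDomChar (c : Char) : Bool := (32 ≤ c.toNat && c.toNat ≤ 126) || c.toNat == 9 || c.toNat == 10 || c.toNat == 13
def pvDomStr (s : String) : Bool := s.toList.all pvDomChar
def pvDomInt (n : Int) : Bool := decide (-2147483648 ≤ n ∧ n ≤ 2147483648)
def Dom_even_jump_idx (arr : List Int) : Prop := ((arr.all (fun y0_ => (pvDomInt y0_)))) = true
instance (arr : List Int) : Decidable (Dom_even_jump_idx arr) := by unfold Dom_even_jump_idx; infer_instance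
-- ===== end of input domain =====

-- B replaces A's quadratic inner scan by one sort of the indices on the key (-value, index)
-- followed by a monotonic-stack next-greater-index pass.

-- ===== PORT A =====
-- models 'arr[j] > max_val' where max_val starts as -float('inf'): none stands for -inf
-- (exact: -inf is only ever compared with ints, and -inf < every int)
def ejGt : Option Int → Int → Bool
  | none, _ => true
  | some v, a => decide (v < a)

def even_jump_idx (arr : List Int) : List (Int × Int) :=
  let n : Int := (arr.length : Int)
  let d0 := (PySem.Dict.empty : PySem.Dict Int Int).insert (n-1) (n-1)
  -- Python's 'if max_ind == i: idx_map[i] = None' is a dead store: it is unconditionally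
  -- overwritten by the following 'idx_map[i] = max_ind', so the net effect is one insert.
  let d := (PySem.List.pyRange 0 (n-1) 1).foldl (fun d i =>
      let st := (PySem.List.pyRange (i+1) n 1).foldl (fun (st : Option Int × Int) j =>
        if PySem.List.pyGetD arr j 0 > PySem.List.pyGetD arr i 0 then st
        else if ejGt st.1 (PySem.List.pyGetD arr j 0) then (some (PySem.List.pyGetD arr j 0), j) else st)
        ((none : Option Int), i)
      d.insert i st.2) d0
  d.items

-- ===== PORT B =====
-- the 'while stack and ind > stack[-1]' loop (stack top = list head here)
def ejPop (nxt : List Int) (stack : List Int) (ind : Int) : List Int × List Int :=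
  match stack with
  | [] => (nxt, [])
  | top :: rest => if top < ind then ejPop (PySem.List.pySetD nxt top ind) rest ind else (nxt, top :: rest)

def even_jump_idx_alt (arr : List Int) : List (Int × Int) :=
  let n : Int := (arr.length : Int)
  let order := PySem.List.sorted2 (PySem.List.pyRange 0 n 1) (fun i => -(PySem.List.pyGetD arr i 0)) (fun i => i) false
  let p := order.foldl (fun (st : List Int × List Int) ind =>
      let q := ejPop st.1 st.2 ind
      (q.1, ind :: q.2)) (PySem.List.pyRange 0 n 1, ([] : List Int))
  let res := (PySem.Dict.empty : PySem.Dict Int Int).insert (n-1) (n-1)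
  let res := (PySem.List.pyRange 0 (n-1) 1).foldl (fun d i => d.insert i (PySem.List.pyGetD p.1 i 0)) res
  res.items

-- ===== PRECONDITION & SPEC =====
def Spec_even_jump_idx (arr : List Int) (out : List (Int × Int)) : Prop := out = even_jump_idx_alt arr
instance (arr : List Int) (out : List (Int × Int)) : Decidable (Spec_even_jump_idx arr out) := by unfold Spec_even_jump_idx; infer_instance

-- ===== CLAIM (what is proved, stated in full; the proofs are below) =====
def Claim_equal_even_jump_idx : Prop := ∀ (arr : List Int), Dom_even_jump_idx arr → Spec_even_jump_idx arr (even_jump_idx arr)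

-- ===== LEMMAS AND PROOFS =====

def aAt (arr : List Int) (j : Int) : Int := PySem.List.pyGetD arr j 0
def keyf (arr : List Int) (j : Int) : Int ×ₗ Int := toLex (-(aAt arr j), j)

lemma keyf_inj (arr : List Int) {x y : Int} (h : keyf arr x = keyf arr y) : x = y := by
  unfold keyf at h
  have := toLex_inj.mp h
  exact congrArg Prod.snd this

lemma sorted2_eq_sorted_toLex {α : Type} (xs : List α) (k1 k2 : α → Int) (rev : Bool) :
    PySem.List.sorted2 xs k1 k2 rev =
      PySem.List.sorted xs (fun x => toLex (k1 x, k2 x)) rev := by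
  unfold PySem.List.sorted2 PySem.List.sorted
  have hlt : ∀ a b, (decide (k1 a < k1 b) || (!decide (k1 b < k1 a) && decide (k2 a < k2 b)))
      = decide ((toLex (k1 a, k2 a) : Int ×ₗ Int) < toLex (k1 b, k2 b)) := by
    intro a b
    simp only [Prod.Lex.toLex_lt_toLex]
    by_cases h1 : k1 a < k1 b <;> by_cases h2 : k1 b < k1 a <;> by_cases h3 : k2 a < k2 b <;>
      simp [h1, h2, h3] <;> omega
  cases rev <;> simp only [hlt]

def ejOrder (arr : List Int) : List Int :=
  PySem.List.sorted2 (PySem.List.pyRange 0 (arr.length : Int) 1)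
    (fun i => -(PySem.List.pyGetD arr i 0)) (fun i => i) false

lemma ejOrder_eq (arr : List Int) :
    ejOrder arr = PySem.List.sorted (PySem.List.pyRange 0 (arr.length : Int) 1) (keyf arr) false := by
  unfold ejOrder
  rw [sorted2_eq_sorted_toLex]
  rfl

lemma ejOrder_perm (arr : List Int) : (ejOrder arr).Perm (PySem.List.pyRange 0 (arr.length : Int) 1) := by
  rw [ejOrder_eq]; exact PySem.List.sorted_perm _ _ _

lemma ejOrder_mem (arr : List Int) (x : Int) : x ∈ ejOrder arr ↔ 0 ≤ x ∧ x < (arr.length : Int) := by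
  rw [(ejOrder_perm arr).mem_iff, PySem.List.mem_pyRange_one]

lemma ejOrder_nodup (arr : List Int) : (ejOrder arr).Nodup :=
  (ejOrder_perm arr).nodup_iff.mpr (PySem.List.nodup_pyRange_one 0 _)

lemma ejOrder_pairwise (arr : List Int) :
    (ejOrder arr).Pairwise (fun x y => keyf arr x < keyf arr y) := by
  have h1 : (ejOrder arr).Pairwise (fun x y => keyf arr x ≤ keyf arr y) := by
    rw [ejOrder_eq]; exact PySem.List.sorted_pairwise _ _
  have h2 := (ejOrder_nodup arr)
  rw [List.Nodup] at h2
  exact (h1.and h2).imp (fun {x y} h => lt_of_le_of_ne h.1 (fun he => h.2 (keyf_inj arr he)))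


def ejStep (arr : List Int) (i : Int) (st : Option Int × Int) (j : Int) : Option Int × Int :=
  if aAt arr j > aAt arr i then st
  else if ejGt st.1 (aAt arr j) then (some (aAt arr j), j) else st

def cands (arr : List Int) (i : Int) (L : List Int) : List Int :=
  L.filter (fun j => decide (aAt arr j ≤ aAt arr i))

def isBest (arr : List Int) (i : Int) (C : List Int) (r : Int) : Prop :=
  (C = [] ∧ r = i) ∨ (r ∈ C ∧ ∀ j ∈ C, keyf arr r ≤ keyf arr j)

lemma keyf_lt_iff (arr : List Int) (x y : Int) :
    keyf arr x < keyf arr y ↔ (aAt arr y < aAt arr x ∨ (aAt arr x = aAt arr y ∧ x < y)) := by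
  unfold keyf
  rw [Prod.Lex.toLex_lt_toLex]
  constructor <;> (intro h; rcases h with h | ⟨h1, h2⟩) <;> [left; right; left; right] <;> omega

lemma ejInner_some (arr : List Int) (i : Int) :
    ∀ (L : List Int) (m : Int), (m :: L).Pairwise (· < ·) →
      ∃ r, L.foldl (ejStep arr i) (some (aAt arr m), m) = (some (aAt arr r), r)
        ∧ r ∈ m :: cands arr i L
        ∧ ∀ j ∈ m :: cands arr i L, keyf arr r ≤ keyf arr j := by
  intro L
  induction L with
  | nil =>
    intro m _
    exact ⟨m, rfl, by simp [cands], by simp [cands]⟩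
  | cons j L ih =>
    intro m hpw
    have hmj : m < j := (List.pairwise_cons.mp hpw).1 j (by simp)
    have hpwj : (j :: L).Pairwise (· < ·) := (List.pairwise_cons.mp hpw).2
    have hpwm : (m :: L).Pairwise (· < ·) := by
      refine List.Pairwise.sublist ?_ hpw
      exact List.Sublist.cons₂ m (List.sublist_cons_self j L)
    simp only [List.foldl_cons]
    by_cases hskip : aAt arr j > aAt arr i
    · have hstep : ejStep arr i (some (aAt arr m), m) j = (some (aAt arr m), m) := by
        simp [ejStep, hskip]
      rw [hstep]
      have hc : cands arr i (j :: L) = cands arr i L := by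
        simp only [cands, List.filter_cons]
        have : ¬ (aAt arr j ≤ aAt arr i) := by omega
        simp [this]
      rw [hc]
      exact ih m hpwm
    · have hcj : aAt arr j ≤ aAt arr i := by omega
      have hc : cands arr i (j :: L) = j :: cands arr i L := by
        simp only [cands, List.filter_cons]
        simp [hcj]
      rw [hc]
      by_cases hrepl : aAt arr m < aAt arr j
      · have hstep : ejStep arr i (some (aAt arr m), m) j = (some (aAt arr j), j) := by
          simp [ejStep, ejGt, hskip, hrepl]
        rw [hstep]
        obtain ⟨r, h1, h2, h3⟩ := ih j hpwj
        refine ⟨r, h1, ?_, ?_⟩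
        · rcases List.mem_cons.mp h2 with rfl | h
          · exact List.mem_cons_of_mem _ List.mem_cons_self
          · exact List.mem_cons_of_mem _ (List.mem_cons_of_mem _ h)
        · intro x hx
          rcases List.mem_cons.mp hx with rfl | hx
          · -- x = m : keyf r ≤ keyf j < keyf m
            have hjm : keyf arr j < keyf arr x := (keyf_lt_iff arr _ _).mpr (Or.inl hrepl)
            exact le_of_lt (lt_of_le_of_lt (h3 j List.mem_cons_self) hjm)
          · exact h3 x hx
      · have hstep : ejStep arr i (some (aAt arr m), m) j = (some (aAt arr m), m) := by
          simp [ejStep, ejGt, hskip]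
          intro h; omega
        rw [hstep]
        obtain ⟨r, h1, h2, h3⟩ := ih m hpwm
        refine ⟨r, h1, ?_, ?_⟩
        · rcases List.mem_cons.mp h2 with rfl | h
          · exact List.mem_cons_self
          · exact List.mem_cons_of_mem _ (List.mem_cons_of_mem _ h)
        · intro x hx
          rcases List.mem_cons.mp hx with rfl | hx
          · exact h3 x List.mem_cons_self
          · rcases List.mem_cons.mp hx with rfl | hx
            · -- x = j : keyf r ≤ keyf m < keyf j  (aAt j ≤ aAt m, tie broken by m < j)
              have hmx : keyf arr m < keyf arr x := by
                rw [keyf_lt_iff]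
                omega
              exact le_of_lt (lt_of_le_of_lt (h3 m List.mem_cons_self) hmx)
            · exact h3 x (List.mem_cons_of_mem _ hx)

lemma ejInner_none (arr : List Int) (i : Int) (L : List Int) (hpw : L.Pairwise (· < ·)) :
    isBest arr i (cands arr i L) ((L.foldl (ejStep arr i) ((none : Option Int), i)).2) := by
  induction L with
  | nil => exact Or.inl ⟨rfl, rfl⟩
  | cons j L ih =>
    have hpwj : L.Pairwise (· < ·) := (List.pairwise_cons.mp hpw).2
    simp only [List.foldl_cons]
    by_cases hskip : aAt arr j > aAt arr i
    · have hstep : ejStep arr i ((none : Option Int), i) j = ((none : Option Int), i) := by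
        simp [ejStep, hskip]
      have hc : cands arr i (j :: L) = cands arr i L := by
        simp only [cands, List.filter_cons]
        have : ¬ (aAt arr j ≤ aAt arr i) := by omega
        simp [this]
      rw [hstep, hc]
      exact ih hpwj
    · have hcj : aAt arr j ≤ aAt arr i := by omega
      have hc : cands arr i (j :: L) = j :: cands arr i L := by
        simp only [cands, List.filter_cons]; simp [hcj]
      have hstep : ejStep arr i ((none : Option Int), i) j = (some (aAt arr j), j) := by
        simp [ejStep, ejGt, hskip]
      rw [hstep, hc]
      obtain ⟨r, h1, h2, h3⟩ := ejInner_some arr i L j hpw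
      rw [h1]
      exact Or.inr ⟨h2, h3⟩


def ejRun (nxt stack : List Int) (Q : List Int) : List Int × List Int :=
  Q.foldl (fun (st : List Int × List Int) ind =>
      let q := ejPop st.1 st.2 ind
      (q.1, ind :: q.2)) (nxt, stack)

def nextGreaterIn (Q : List Int) (x : Int) : Option Int :=
  (Q.drop (Q.idxOf x + 1)).find? (fun y => decide (x < y))

lemma pyGetD_nonneg_eq (xs : List Int) (k : Int) (hk : 0 ≤ k) :
    PySem.List.pyGetD xs k 0 = xs.getD k.toNat 0 := by
  have h : k = ((k.toNat : Nat) : Int) := by omega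
  conv_lhs => rw [h]
  rw [PySem.List.pyGetD_natCast]

lemma get_set_int (nxt : List Int) (x v k : Int) (hx : 0 ≤ x) (hxl : x < (nxt.length : Int)) (hk : 0 ≤ k) :
    PySem.List.pyGetD (PySem.List.pySetD nxt x v) k 0 = if k = x then v else PySem.List.pyGetD nxt k 0 := by
  rw [PySem.List.pySetD_of_nonneg nxt v hx, pyGetD_nonneg_eq _ _ hk, pyGetD_nonneg_eq _ _ hk]
  by_cases hkx : k = x
  · subst hkx
    simp [List.getD, List.getElem?_set]
    rw [if_pos (show k.toNat < nxt.length by omega)]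
    rfl
  · have : k.toNat ≠ x.toNat ∨ k ≥ (nxt.length : Int) := by omega
    rcases this with h | h
    · simp [List.getD, Ne.symm h, hkx]
    · have h1 : nxt.length ≤ k.toNat := by omega
      simp [List.getD, List.getElem?_eq_none (by simpa using h1), List.getElem?_eq_none (l := nxt.set x.toNat v) (by simpa using h1), hkx]

lemma ejSets_length (L : List Int) : ∀ (nxt : List Int) (v : Int),
    (L.foldl (fun nx x => PySem.List.pySetD nx x v) nxt).length = nxt.length := by
  induction L with
  | nil => intro nxt v; rfl
  | cons x L ih =>
    intro nxt v
    simp only [List.foldl_cons]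
    rw [ih, PySem.List.length_pySetD]

lemma ejSets_get (L : List Int) : ∀ (nxt : List Int) (v k : Int),
    (∀ x ∈ L, 0 ≤ x ∧ x < (nxt.length : Int)) → 0 ≤ k →
    PySem.List.pyGetD (L.foldl (fun nx x => PySem.List.pySetD nx x v) nxt) k 0 =
      if k ∈ L then v else PySem.List.pyGetD nxt k 0 := by
  induction L with
  | nil => intro nxt v k _ _; simp
  | cons x L ih =>
    intro nxt v k hL hk
    have hx := hL x (by simp)
    simp only [List.foldl_cons]
    rw [ih _ _ _ (fun y hy => by rw [PySem.List.length_pySetD]; exact hL y (List.mem_cons_of_mem _ hy)) hk]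
    rw [get_set_int nxt x v k hx.1 hx.2 hk]
    by_cases h1 : k ∈ L <;> by_cases h2 : k = x <;> simp [h1, h2]

lemma ejPop_eq (S : List Int) : ∀ (nxt : List Int) (ind : Int),
    ejPop nxt S ind =
      ((S.takeWhile (fun x => decide (x < ind))).foldl (fun nx x => PySem.List.pySetD nx x ind) nxt,
        S.dropWhile (fun x => decide (x < ind))) := by
  induction S with
  | nil => intro nxt ind; rfl
  | cons t S ih =>
    intro nxt ind
    by_cases h : t < ind
    · simp only [ejPop, if_pos h, List.takeWhile_cons, List.dropWhile_cons, decide_eq_true h]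
      simpa using ih _ ind
    · simp only [ejPop, if_neg h, List.takeWhile_cons, List.dropWhile_cons]
      simp [h]

lemma mem_takeWhile_lt (q k : Int) (S : List Int) (hpw : S.Pairwise (· < ·)) :
    (k ∈ S.takeWhile (fun x => decide (x < q))) ↔ k ∈ S ∧ k < q := by
  induction S with
  | nil => simp
  | cons s S ih =>
    have hpwS := (List.pairwise_cons.mp hpw).2
    have hs := (List.pairwise_cons.mp hpw).1
    by_cases h : s < q
    · rw [List.takeWhile_cons_of_pos (by simpa using h)]
      simp only [List.mem_cons]
      rw [ih hpwS]
      constructor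
      · rintro (rfl | ⟨h1, h2⟩)
        · exact ⟨Or.inl rfl, h⟩
        · exact ⟨Or.inr h1, h2⟩
      · rintro ⟨rfl | h1, h2⟩
        · exact Or.inl rfl
        · exact Or.inr ⟨h1, h2⟩
    · rw [List.takeWhile_cons_of_neg (by simpa using h)]
      simp only [List.not_mem_nil, false_iff]
      rintro ⟨h1, h2⟩
      rcases List.mem_cons.mp h1 with rfl | h1
      · omega
      · have := hs k h1; omega

lemma mem_dropWhile_lt (q k : Int) (S : List Int) (hpw : S.Pairwise (· < ·)) :
    (k ∈ S.dropWhile (fun x => decide (x < q))) ↔ k ∈ S ∧ ¬ k < q := by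
  induction S with
  | nil => simp
  | cons s S ih =>
    have hpwS := (List.pairwise_cons.mp hpw).2
    have hs := (List.pairwise_cons.mp hpw).1
    by_cases h : s < q
    · rw [List.dropWhile_cons_of_pos (by simpa using h)]
      rw [ih hpwS]
      simp only [List.mem_cons]
      constructor
      · rintro ⟨h1, h2⟩; exact ⟨Or.inr h1, h2⟩
      · rintro ⟨rfl | h1, h2⟩
        · omega
        · exact ⟨h1, h2⟩
    · rw [List.dropWhile_cons_of_neg (by simpa using h)]
      constructor
      · intro h1
        refine ⟨h1, ?_⟩
        rcases List.mem_cons.mp h1 with rfl | h1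
        · omega
        · have := hs k h1; omega
      · exact fun h1 => h1.1

lemma ejRun_spec : ∀ (Q S nxt : List Int),
    (S ++ Q).Nodup → S.Pairwise (· < ·) →
    (∀ x ∈ S ++ Q, 0 ≤ x ∧ x < (nxt.length : Int)) →
    ∀ k : Int, 0 ≤ k →
    PySem.List.pyGetD (ejRun nxt S Q).1 k 0 =
      if k ∈ S then ((Q.find? (fun y => decide (k < y))).getD (PySem.List.pyGetD nxt k 0))
      else if k ∈ Q then ((nextGreaterIn Q k).getD (PySem.List.pyGetD nxt k 0))
      else PySem.List.pyGetD nxt k 0 := by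
  intro Q
  induction Q with
  | nil =>
    intro S nxt _ _ _ k _
    simp [ejRun]
  | cons q Q' ih =>
    intro S nxt hnd hpw hbnd k hk
    -- unfold one step of the fold
    have hstep : ejRun nxt S (q :: Q') =
        ejRun ((S.takeWhile (fun x => decide (x < q))).foldl (fun nx x => PySem.List.pySetD nx x q) nxt)
              (q :: S.dropWhile (fun x => decide (x < q))) Q' := by
      simp only [ejRun, List.foldl_cons, ejPop_eq]
    set TL := S.takeWhile (fun x => decide (x < q)) with hTL
    set Sr := S.dropWhile (fun x => decide (x < q)) with hSr
    set nxt1 := TL.foldl (fun nx x => PySem.List.pySetD nx x q) nxt with hnxt1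
    -- structural facts
    have hndS : S.Nodup := (List.nodup_append.mp hnd).1
    have hndQ : (q :: Q').Nodup := (List.nodup_append.mp hnd).2.1
    have hdisj : ∀ a ∈ S, ∀ b ∈ q :: Q', a ≠ b := (List.nodup_append.mp hnd).2.2
    have hqS : q ∉ S := fun h => hdisj q h q List.mem_cons_self rfl
    have hqQ' : q ∉ Q' := (List.nodup_cons.mp hndQ).1
    have hndQ' : Q'.Nodup := (List.nodup_cons.mp hndQ).2
    have hSrS : Sr.Sublist S := List.dropWhile_sublist _
    have hTLS : TL.Sublist S := List.takeWhile_sublist _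
    have hpwSr : Sr.Pairwise (· < ·) := hpw.sublist hSrS
    have hq := hbnd q (List.mem_append_right _ List.mem_cons_self)
    have hlen1 : nxt1.length = nxt.length := ejSets_length TL nxt q
    have hmemTL : ∀ x, x ∈ TL ↔ x ∈ S ∧ x < q := fun x => mem_takeWhile_lt q x S hpw
    have hmemSr : ∀ x, x ∈ Sr ↔ x ∈ S ∧ ¬ x < q := fun x => mem_dropWhile_lt q x S hpw
    have hbTL : ∀ x ∈ TL, 0 ≤ x ∧ x < (nxt.length : Int) := fun x hx =>
      hbnd x (List.mem_append_left _ (hTLS.mem hx))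
    have hget1 : ∀ x : Int, 0 ≤ x →
        PySem.List.pyGetD nxt1 x 0 = if x ∈ TL then q else PySem.List.pyGetD nxt x 0 :=
      fun x hx => ejSets_get TL nxt q x hbTL hx
    -- hypotheses for the IH
    have hpw2 : (q :: Sr).Pairwise (· < ·) := by
      refine List.pairwise_cons.mpr ⟨?_, hpwSr⟩
      intro x hx
      have h1 := (hmemSr x).mp hx
      have : x ≠ q := fun he => hqS (he ▸ h1.1)
      omega
    have hnd2 : ((q :: Sr) ++ Q').Nodup := by
      have h1 : (Sr ++ Q').Nodup := by
        rw [List.nodup_append]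
        exact ⟨hSrS.nodup hndS, hndQ', fun a ha b hb => hdisj a (hSrS.mem ha) b (List.mem_cons_of_mem _ hb)⟩
      rw [List.cons_append, List.nodup_cons]
      refine ⟨?_, h1⟩
      intro h
      rcases List.mem_append.mp h with h | h
      · exact hqS (hSrS.mem h)
      · exact hqQ' h
    have hbnd2 : ∀ x ∈ (q :: Sr) ++ Q', 0 ≤ x ∧ x < (nxt1.length : Int) := by
      intro x hx
      rw [hlen1]
      rcases List.mem_append.mp hx with hx | hx
      · rcases List.mem_cons.mp hx with rfl | hx
        · exact hq
        · exact hbnd x (List.mem_append_left _ (hSrS.mem hx))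
      · exact hbnd x (List.mem_append_right _ (List.mem_cons_of_mem _ hx))
    have IH := ih (q :: Sr) nxt1 hnd2 hpw2 hbnd2 k hk
    rw [hstep, IH]
    -- now case analysis on where k lives
    by_cases hkS : k ∈ S
    · have hkq : k ≠ q := fun he => hqS (he ▸ hkS)
      have hkQ' : k ∉ Q' := fun h => hdisj k hkS k (List.mem_cons_of_mem _ h) rfl
      rw [if_pos hkS]
      by_cases hklt : k < q
      · -- k was popped: assigned q
        have hkTL : k ∈ TL := (hmemTL k).mpr ⟨hkS, hklt⟩
        have hkSr : k ∉ Sr := fun h => ((hmemSr k).mp h).2 hklt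
        have hk2 : k ∉ q :: Sr := by
          intro h; rcases List.mem_cons.mp h with rfl | h
          · exact hkq rfl
          · exact hkSr h
        rw [if_neg hk2, if_neg hkQ']
        rw [hget1 k hk, if_pos hkTL]
        rw [List.find?_cons_of_pos (by simpa using hklt)]
        rfl
      · -- k stays on the stack
        have hkSr : k ∈ Sr := (hmemSr k).mpr ⟨hkS, hklt⟩
        have hkTL : k ∉ TL := fun h => hklt ((hmemTL k).mp h).2
        rw [if_pos (List.mem_cons_of_mem _ hkSr)]
        rw [hget1 k hk, if_neg hkTL]
        rw [List.find?_cons_of_neg (by simpa using hklt)]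
    · rw [if_neg hkS]
      by_cases hkq : k = q
      · subst hkq
        rw [if_pos (List.mem_cons_self), if_pos List.mem_cons_self]
        have hkTL : k ∉ TL := fun h => hkS ((hmemTL k).mp h).1
        rw [hget1 k hk, if_neg hkTL]
        have : nextGreaterIn (k :: Q') k = Q'.find? (fun y => decide (k < y)) := by
          unfold nextGreaterIn
          rw [List.idxOf_cons_self]
          rfl
        rw [this]
      · have hk2 : k ∉ q :: Sr := by
          intro h; rcases List.mem_cons.mp h with rfl | h
          · exact hkq rfl
          · exact hkS ((hmemSr k).mp h).1
        rw [if_neg hk2]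
        have hkTL : k ∉ TL := fun h => hkS ((hmemTL k).mp h).1
        by_cases hkQ' : k ∈ Q'
        · rw [if_pos hkQ', if_pos (List.mem_cons_of_mem _ hkQ')]
          rw [hget1 k hk, if_neg hkTL]
          have : nextGreaterIn (q :: Q') k = nextGreaterIn Q' k := by
            unfold nextGreaterIn
            rw [List.idxOf_cons_ne _ (by exact fun h => hkq h.symm)]
            simp [List.drop_succ_cons]
          rw [this]
        · have hkQ : k ∉ q :: Q' := by
            intro h; rcases List.mem_cons.mp h with rfl | h
            · exact hkq rfl
            · exact hkQ' h
          rw [if_neg hkQ', if_neg hkQ]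
          exact hget1 k hk |>.trans (by rw [if_neg hkTL])

lemma nextGreaterIn_append (P : List Int) : ∀ (T : List Int) (i : Int), i ∉ P →
    nextGreaterIn (P ++ i :: T) i = T.find? (fun y => decide (i < y)) := by
  induction P with
  | nil =>
    intro T i _
    unfold nextGreaterIn
    rw [List.nil_append, List.idxOf_cons_self]
    rfl
  | cons p P' ih =>
    intro T i hP
    have hip : p ≠ i := fun h => hP (h ▸ List.mem_cons_self)
    unfold nextGreaterIn
    rw [List.cons_append, List.idxOf_cons_ne _ hip]
    rw [Nat.succ_eq_add_one, List.drop_succ_cons]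
    exact ih T i (fun h => hP (List.mem_cons_of_mem _ h))

lemma ord_best (arr : List Int) (i : Int) (hi : 0 ≤ i) (hilt : i < (arr.length : Int)) :
    isBest arr i (cands arr i (PySem.List.pyRange (i+1) (arr.length : Int) 1))
      ((nextGreaterIn (ejOrder arr) i).getD i) := by
  have hiord : i ∈ ejOrder arr := (ejOrder_mem arr i).mpr ⟨hi, hilt⟩
  obtain ⟨P, T, hord⟩ := List.append_of_mem hiord
  have hnd := ejOrder_nodup arr
  have hpw := ejOrder_pairwise arr
  rw [hord] at hnd hpw
  have hiP : i ∉ P := by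
    have := (List.nodup_append.mp hnd).2.2
    exact fun h => this i h i List.mem_cons_self rfl
  have hpw3 := List.pairwise_append.mp hpw
  have hpwT : (i :: T).Pairwise (fun x y => keyf arr x < keyf arr y) := hpw3.2.1
  have hiT : ∀ j ∈ T, keyf arr i < keyf arr j := (List.pairwise_cons.mp hpwT).1
  -- candidates are exactly the elements of T greater than i
  have hmemT : ∀ j : Int, (j ∈ T ∧ i < j) ↔ j ∈ cands arr i (PySem.List.pyRange (i+1) (arr.length : Int) 1) := by
    intro j
    rw [cands, List.mem_filter, PySem.List.mem_pyRange_one]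
    constructor
    · rintro ⟨hjT, hij⟩
      have hjord : j ∈ ejOrder arr := by rw [hord]; exact List.mem_append_right _ (List.mem_cons_of_mem _ hjT)
      have hbj := (ejOrder_mem arr j).mp hjord
      have hkey := hiT j hjT
      rw [keyf_lt_iff] at hkey
      refine ⟨⟨by omega, hbj.2⟩, by simp; omega⟩
    · rintro ⟨⟨h1, h2⟩, h3⟩
      have h3 : aAt arr j ≤ aAt arr i := by simpa using h3
      have hij : i < j := by omega
      have hjord : j ∈ ejOrder arr := (ejOrder_mem arr j).mpr ⟨by omega, h2⟩
      have hkey : keyf arr i < keyf arr j := by rw [keyf_lt_iff]; omega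
      rw [hord] at hjord
      rcases List.mem_append.mp hjord with h | h
      · exfalso
        have := hpw3.2.2 j h i List.mem_cons_self
        exact absurd hkey (lt_asymm this)
      · rcases List.mem_cons.mp h with rfl | h
        · omega
        · exact ⟨h, hij⟩
  rw [hord, nextGreaterIn_append P T i hiP]
  cases hfind : T.find? (fun y => decide (i < y)) with
  | none =>
    left
    constructor
    · rw [List.eq_nil_iff_forall_not_mem]
      intro j hj
      obtain ⟨hjT, hij⟩ := (hmemT j).mpr hj
      exact absurd (by simpa using List.find?_eq_none.mp hfind j hjT) (by simpa using hij)
    · rfl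
  | some j =>
    obtain ⟨hpj, T1, T2, hT, hT1⟩ := List.find?_eq_some_iff_append.mp hfind
    have hij : i < j := by simpa using hpj
    have hjT : j ∈ T := by rw [hT]; exact List.mem_append_right _ List.mem_cons_self
    right
    refine ⟨(hmemT j).mp ⟨hjT, hij⟩, ?_⟩
    intro j' hj'
    obtain ⟨hj'T, hij'⟩ := (hmemT j').mpr hj'
    have hpwT' : T.Pairwise (fun x y => keyf arr x < keyf arr y) := (List.pairwise_cons.mp hpwT).2
    rw [hT] at hj'T
    rcases List.mem_append.mp hj'T with h | h
    · exfalso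
      have := hT1 j' h
      simp at this
      omega
    · rcases List.mem_cons.mp h with rfl | h
      · exact le_refl _
      · rw [hT] at hpwT'
        have := (List.pairwise_cons.mp (List.pairwise_append.mp hpwT').2.1).1 j' h
        exact le_of_lt this

lemma isBest_unique (arr : List Int) (i : Int) (C : List Int) (r s : Int)
    (hr : isBest arr i C r) (hs : isBest arr i C s) : r = s := by
  rcases hr with ⟨hC, rfl⟩ | ⟨hrC, hrmin⟩
  · rcases hs with ⟨_, rfl⟩ | ⟨hsC, _⟩
    · rfl
    · rw [hC] at hsC; exact absurd hsC (List.not_mem_nil)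
  · rcases hs with ⟨hC, rfl⟩ | ⟨hsC, hsmin⟩
    · rw [hC] at hrC; exact absurd hrC (List.not_mem_nil)
    · exact keyf_inj arr (le_antisymm (hrmin s hsC) (hsmin r hrC))

lemma pyGetD_pyRange_self (n i : Int) (hi : 0 ≤ i) (hlt : i < n) :
    PySem.List.pyGetD (PySem.List.pyRange 0 n 1) i 0 = i := by
  have hlen : ((PySem.List.pyRange 0 n 1).length : Int) = n := by
    rw [PySem.List.length_pyRange_one]; omega
  rw [PySem.List.pyGetD_eq_getElem _ _ hi (by omega)]
  rw [PySem.List.getElem_pyRange_one]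
  omega

def ejBnxt (arr : List Int) : List Int :=
  (ejRun (PySem.List.pyRange 0 (arr.length : Int) 1) [] (ejOrder arr)).1

def ejAval (arr : List Int) (i : Int) : Int :=
  ((PySem.List.pyRange (i+1) (arr.length : Int) 1).foldl (ejStep arr i) ((none : Option Int), i)).2

lemma ejAval_isBest (arr : List Int) (i : Int) :
    isBest arr i (cands arr i (PySem.List.pyRange (i+1) (arr.length : Int) 1)) (ejAval arr i) :=
  ejInner_none arr i _ (PySem.List.pairwise_lt_pyRange_one _ _)

lemma ejBnxt_get (arr : List Int) (i : Int) (hi : 0 ≤ i) (hlt : i < (arr.length : Int)) :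
    PySem.List.pyGetD (ejBnxt arr) i 0 = (nextGreaterIn (ejOrder arr) i).getD i := by
  have hlen : ((PySem.List.pyRange 0 (arr.length : Int) 1).length : Int) = (arr.length : Int) := by
    rw [PySem.List.length_pyRange_one]; omega
  have hrs := ejRun_spec (ejOrder arr) [] (PySem.List.pyRange 0 (arr.length : Int) 1)
    (by simpa using ejOrder_nodup arr)
    (by simp)
    (by
      intro x hx
      simp only [List.nil_append] at hx
      have := (ejOrder_mem arr x).mp hx
      omega)
    i hi
  unfold ejBnxt
  rw [hrs]
  rw [if_neg (List.not_mem_nil), if_pos ((ejOrder_mem arr i).mpr ⟨hi, hlt⟩)]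
  rw [pyGetD_pyRange_self _ _ hi hlt]

lemma ej_pointwise (arr : List Int) (i : Int) (hi : 0 ≤ i) (hlt : i < (arr.length : Int)) :
    ejAval arr i = PySem.List.pyGetD (ejBnxt arr) i 0 := by
  rw [ejBnxt_get arr i hi hlt]
  exact isBest_unique arr i _ _ _ (ejAval_isBest arr i) (ord_best arr i hi hlt)

lemma even_jump_idx_eq (arr : List Int) :
    even_jump_idx arr =
      ((PySem.List.pyRange 0 ((arr.length : Int) - 1) 1).foldl
        (fun d i => d.insert i (ejAval arr i))
        ((PySem.Dict.empty : PySem.Dict Int Int).insert ((arr.length : Int) - 1) ((arr.length : Int) - 1))).items := rfl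

lemma even_jump_idx_alt_eq (arr : List Int) :
    even_jump_idx_alt arr =
      ((PySem.List.pyRange 0 ((arr.length : Int) - 1) 1).foldl
        (fun d i => d.insert i (PySem.List.pyGetD (ejBnxt arr) i 0))
        ((PySem.Dict.empty : PySem.Dict Int Int).insert ((arr.length : Int) - 1) ((arr.length : Int) - 1))).items := rfl

-- ===== VERDICT (by name: the statement is the Claim_ definition above) =====
theorem even_jump_idx_spec : Claim_equal_even_jump_idx := by
  intro arr _
  unfold Spec_even_jump_idx
  rw [even_jump_idx_eq, even_jump_idx_alt_eq]
  congr 1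
  apply PySem.List.foldl_congr_mem
  intro d i hi
  have hmem := PySem.List.mem_pyRange_one.mp hi
  exact congrArg (fun v => d.insert i v) (ej_pointwise arr i hmem.1 (by omega))
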